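-- pv_equiv track=rewrite | github.com/pypi-data/pypi-code-62 | django-property-filter/django_property_filter-0.7.1-py2.py3-none-any.whl/django_property_filter/utils.py | convert_int_list_to_range_lists
-- ===== SOURCE A (Python) =====
-- def convert_int_list_to_range_lists(int_list):
--     """
--     Convert a list of numbers to ranges and returns a list of tuples representing the ranges.
--
--     Single numbers will be represented as (3, 3), while ranges will be (4, 8)
--     """
--     # Build a list of lists
--     range_list = []
--     for num in sorted(int_list):
--         if range_list:
--             # Check if Part of range
--             if range_list[-1][1] + 1 == num:  # Continuing a range
--                 range_list[-1][1] = num  # Update Range End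
--             else:  # Not continuing range
--                 range_list.append([num, num])
--         else:
--             range_list.append([num, num])
--
--     # Convert to a list of tuples, could do with list of lists but not really any real overhead
--     range_list = [(x[0], x[1]) for x in range_list]
--
--     return range_list
-- ===== SOURCE B (Python) =====
-- import itertools
--
--
-- def convert_int_list_to_range_lists(int_list):
--     """
--     Convert a list of numbers to ranges and returns a list of tuples representing the ranges.
--
--     Single numbers will be represented as (3, 3), while ranges will be (4, 8)
--     """
--     result = []
--     for _, group in itertools.groupby(enumerate(sorted(int_list)),
--                                       key=lambda pair: pair[1] - pair[0]):
--         run = list(group)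
--         result.append((run[0][1], run[-1][1]))
--     return result
-- ===== Notes on version B (the rewrite author's own statement) =====
-- stated objective: idiomatic
-- what changed: Replaces A's accumulator loop that mutates the last range's end with an itertools.groupby over enumerate(sorted(list)) keyed by value-minus-index, emitting (first, last) of each group.
import Mathlib
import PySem

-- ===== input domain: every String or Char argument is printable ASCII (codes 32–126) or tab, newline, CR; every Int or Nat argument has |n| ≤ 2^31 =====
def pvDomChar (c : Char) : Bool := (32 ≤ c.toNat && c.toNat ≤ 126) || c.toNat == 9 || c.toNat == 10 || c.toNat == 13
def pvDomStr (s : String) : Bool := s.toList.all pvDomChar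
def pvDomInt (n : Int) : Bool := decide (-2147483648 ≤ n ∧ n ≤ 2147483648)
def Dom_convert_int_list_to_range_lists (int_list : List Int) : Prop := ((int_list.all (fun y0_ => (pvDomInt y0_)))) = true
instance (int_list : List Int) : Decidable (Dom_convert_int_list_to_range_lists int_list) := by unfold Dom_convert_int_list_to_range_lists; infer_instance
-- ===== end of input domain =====

-- B replaces A's accumulator-merge loop (mutating the last range's end) by an itertools.groupby
-- over enumerate(sorted(...)) keyed by value-minus-index; objective: idiomatic, same cost.

-- ===== PORT A =====
-- one loop step: `if range_list: if range_list[-1][1] + 1 == num: … else append else append`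
def pvStepA (acc : List (Int × Int)) (num : Int) : List (Int × Int) :=
  match acc.getLast? with
  | some last =>
      if last.2 + 1 == num then acc.dropLast ++ [(last.1, num)]
      else acc ++ [(num, num)]
  | none => acc ++ [(num, num)]

def convert_int_list_to_range_lists (int_list : List Int) : List (Int × Int) :=
  let range_list := (PySem.List.sorted int_list (fun x => x) false).foldl pvStepA []
  -- `[(x[0], x[1]) for x in range_list]`
  range_list.map (fun x => (x.1, x.2))

-- ===== PORT B =====
-- `key=lambda pair: pair[1] - pair[0]`
def pvKey (p : Int × Int) : Int := p.2 - p.1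

-- streaming itertools.groupby: cur = current group (in order), prev = previous element
def pvGroupGo (cur : List (Int × Int)) (prev : Int × Int) : List (Int × Int) → List (List (Int × Int))
  | [] => [cur]
  | y :: ys =>
      if pvKey prev == pvKey y then pvGroupGo (cur ++ [y]) y ys
      else cur :: pvGroupGo [y] y ys

def pvGroupBy : List (Int × Int) → List (List (Int × Int))
  | [] => []
  | x :: xs => pvGroupGo [x] x xs

def convert_int_list_to_range_lists_alt (int_list : List Int) : List (Int × Int) :=
  (pvGroupBy (PySem.List.enumerate (PySem.List.sorted int_list (fun x => x) false))).map
    (fun run => ((run.headD (0, 0)).2, (run.getLastD (0, 0)).2))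

-- ===== PRECONDITION & SPEC =====
def Spec_convert_int_list_to_range_lists (int_list : List Int) (out : List (Int × Int)) : Prop := out = convert_int_list_to_range_lists_alt int_list
instance (int_list : List Int) (out : List (Int × Int)) : Decidable (Spec_convert_int_list_to_range_lists int_list out) := by unfold Spec_convert_int_list_to_range_lists; infer_instance

-- ===== CLAIM (what is proved, stated in full; the proofs are below) =====
def Claim_equal_convert_int_list_to_range_lists : Prop := ∀ (int_list : List Int), Dom_convert_int_list_to_range_lists int_list → Spec_convert_int_list_to_range_lists int_list (convert_int_list_to_range_lists int_list)

-- ===== LEMMAS AND PROOFS =====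

-- common reference: maximal runs of consecutive integers
def pvRunsGo (lo hi : Int) : List Int → List (Int × Int)
  | [] => [(lo, hi)]
  | y :: ys => if hi + 1 = y then pvRunsGo lo y ys else (lo, hi) :: pvRunsGo y y ys

def pvRuns : List Int → List (Int × Int)
  | [] => []
  | x :: xs => pvRunsGo x x xs

theorem pvA_go (xs : List Int) : ∀ (acc : List (Int × Int)) (lo hi : Int),
    List.foldl pvStepA (acc ++ [(lo, hi)]) xs = acc ++ pvRunsGo lo hi xs := by
  induction xs with
  | nil => intro acc lo hi; simp [pvRunsGo]
  | cons y ys ih =>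
      intro acc lo hi
      by_cases h : hi + 1 = y
      · simp only [List.foldl_cons, pvStepA, List.getLast?_concat, h, beq_self_eq_true,
          if_true, List.dropLast_concat, pvRunsGo, ih]
      · have hb : ((hi + 1 == y) = false) := by simpa using h
        simp only [List.foldl_cons, pvStepA, List.getLast?_concat, hb, Bool.false_eq_true,
          if_false, pvRunsGo, if_neg h, List.append_assoc]
        rw [show acc ++ ([(lo, hi)] ++ [(y, y)]) = (acc ++ [(lo, hi)]) ++ [(y, y)] by simp,
          ih]
        simp

theorem pvA_eq (l : List Int) : List.foldl pvStepA [] l = pvRuns l := by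
  cases l with
  | nil => rfl
  | cons x xs =>
      have := pvA_go xs [] x x
      simpa [pvStepA, pvRuns] using this

theorem pvB_go (ys : List Int) : ∀ (j : Int) (cur : List (Int × Int)) (lo hi : Int),
    cur ≠ [] → (cur.headD (0, 0)).2 = lo → cur.getLast? = some (j, hi) →
    (pvGroupGo cur (j, hi) (PySem.List.enumerate ys (j + 1))).map
        (fun run => ((run.headD (0, 0)).2, (run.getLastD (0, 0)).2))
      = pvRunsGo lo hi ys := by
  induction ys with
  | nil =>
      intro j cur lo hi hne hhead hlast
      simp [PySem.List.enumerate, pvGroupGo, pvRunsGo, List.getLastD_eq_getLast?, hlast,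
        -List.headD_eq_head?_getD, hhead]
  | cons y ys ih =>
      intro j cur lo hi hne hhead hlast
      rw [PySem.List.enumerate_cons]
      by_cases h : hi + 1 = y
      · have hk : (pvKey (j, hi) == pvKey (j + 1, y)) = true := by
          simp only [pvKey, beq_iff_eq]; omega
        rw [pvGroupGo, if_pos hk]
        have : j + 1 + 1 = y - hi + j + 1 := by omega
        rw [show (j + 1 + 1 : Int) = (j + 1) + 1 by ring]
        rw [ih (j + 1) (cur ++ [(j + 1, y)]) lo y (by simp)
          (by cases cur with | nil => exact absurd rfl hne | cons a t => simpa using hhead)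
          (by simp)]
        simp [pvRunsGo, h]
      · have hk : (pvKey (j, hi) == pvKey (j + 1, y)) = false := by
          simp only [pvKey, beq_eq_false_iff_ne, ne_eq]; omega
        rw [pvGroupGo, if_neg (by simp [hk])]
        rw [List.map_cons]
        rw [show (j + 1 + 1 : Int) = (j + 1) + 1 by ring]
        rw [ih (j + 1) [(j + 1, y)] y y (by simp) (by simp) (by simp)]
        simp [pvRunsGo, if_neg h, List.getLastD_eq_getLast?, hlast, -List.headD_eq_head?_getD, hhead]

theorem pvB_eq (l : List Int) :
    (pvGroupBy (PySem.List.enumerate l)).map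
        (fun run => ((run.headD (0, 0)).2, (run.getLastD (0, 0)).2)) = pvRuns l := by
  cases l with
  | nil => rfl
  | cons x xs =>
      rw [show PySem.List.enumerate (x :: xs) = PySem.List.enumerate (x :: xs) 0 from rfl,
        PySem.List.enumerate_cons, pvGroupBy]
      exact pvB_go xs 0 [(0, x)] x x (by simp) (by simp) (by simp)

-- ===== VERDICT (by name: the statement is the Claim_ definition above) =====
theorem convert_int_list_to_range_lists_spec : Claim_equal_convert_int_list_to_range_lists := by
  intro int_list _
  unfold Spec_convert_int_list_to_range_lists convert_int_list_to_range_lists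
    convert_int_list_to_range_lists_alt
  rw [pvB_eq, ← pvA_eq]
  simp
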